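-- pv_equiv track=rewrite | github.com/wietze/bsides-ldn-2019 | app/commands/command.py | cmd_find_command
-- ===== SOURCE A (Python) =====
-- from typing import Union, List
--
-- def cmd_find_command(cmd_command: List[str]) -> (int, str):
--     found = False
--     for i, cmd in enumerate(cmd_command):
--         if found:
--             return i, cmd
--         elif cmd.lower() in ['/c', '/k']:
--             found=True
--     return -1, None
-- ===== SOURCE B (Python) =====
-- def cmd_find_command(cmd_command):
--     lowered = [c.lower() for c in cmd_command]
--     hits = [lowered.index(m) for m in ('/c', '/k') if m in lowered]
--     if not hits:
--         return -1, None
--     nxt = min(hits) + 1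
--     if nxt >= len(cmd_command):
--         return -1, None
--     return nxt, cmd_command[nxt]
-- ===== Notes on version B (the rewrite author's own statement) =====
-- stated objective: alternative
-- what changed: Replaces A's stateful found-flag scan with staged passes: lowercase the whole list once, locate each of the two marker tokens separately with list.index, take the minimum hit position, then bounds-check position+1.
import Mathlib
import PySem

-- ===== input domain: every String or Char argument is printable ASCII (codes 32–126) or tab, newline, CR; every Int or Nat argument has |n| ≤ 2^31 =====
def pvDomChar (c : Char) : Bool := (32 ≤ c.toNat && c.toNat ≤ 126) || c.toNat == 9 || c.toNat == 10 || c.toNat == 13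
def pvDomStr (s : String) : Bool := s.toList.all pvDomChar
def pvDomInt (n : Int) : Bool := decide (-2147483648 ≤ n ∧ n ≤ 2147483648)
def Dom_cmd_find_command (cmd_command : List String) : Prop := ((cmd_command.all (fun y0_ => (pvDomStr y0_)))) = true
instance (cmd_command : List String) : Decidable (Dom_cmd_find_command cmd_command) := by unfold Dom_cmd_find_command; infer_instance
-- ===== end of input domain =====

-- B replaces A's found-flag scan by staged passes (lowercase once, search each marker separately
-- with list.index, take the minimum hit, bounds-check); objective: alternative decomposition.

-- ===== PORT A =====
-- the for-loop with the `found` flag; `i` is the running enumerate counter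
def cmdFindLoop : List String → Int → Bool → Int × Option String
  | [], _, _ => (-1, none)
  | cmd :: rest, i, found =>
    if found then (i, some cmd)
    else if PySem.Str.lower cmd ∈ ["/c", "/k"] then cmdFindLoop rest (i + 1) true
    else cmdFindLoop rest (i + 1) false

def cmd_find_command (cmd_command : List String) : Int × Option String :=
  cmdFindLoop cmd_command 0 false

-- ===== PORT B =====
def cmd_find_command_alt (cmd_command : List String) : Int × Option String :=
  let lowered := cmd_command.map PySem.Str.lower
  let hits := (["/c", "/k"].filter (fun m => decide (m ∈ lowered))).filterMap
      (fun m => PySem.List.index? lowered m)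
  match PySem.List.min? hits (fun x => x) with
  | none => (-1, none)
  | some j =>
    if h : j + 1 < cmd_command.length then ((j : Int) + 1, some cmd_command[j + 1])
    else (-1, none)

-- ===== PRECONDITION & SPEC =====
def Spec_cmd_find_command (cmd_command : List String) (out : Int × Option String) : Prop := out = cmd_find_command_alt cmd_command
instance (cmd_command : List String) (out : Int × Option String) : Decidable (Spec_cmd_find_command cmd_command out) := by unfold Spec_cmd_find_command; infer_instance

-- ===== CLAIM (what is proved, stated in full; the proofs are below) =====
def Claim_equal_cmd_find_command : Prop := ∀ (cmd_command : List String), Dom_cmd_find_command cmd_command → Spec_cmd_find_command cmd_command (cmd_find_command cmd_command)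

-- ===== LEMMAS AND PROOFS =====

-- A's loop from counter i with found = false, characterized by findIdx?
theorem cmdFindLoop_false (l : List String) (i : Int) :
    cmdFindLoop l i false =
      match l.findIdx? (fun c => PySem.Str.lower c ∈ ["/c", "/k"]) with
      | none => (-1, none)
      | some j =>
        if h : j + 1 < l.length then (i + (j : Int) + 1, some l[j + 1])
        else (-1, none) := by
  induction l generalizing i with
  | nil => simp [cmdFindLoop]
  | cons c rest ih =>
    by_cases hp : PySem.Str.lower c ∈ ["/c", "/k"]
    · simp only [cmdFindLoop, hp, if_true, if_false, Bool.false_eq_true, List.findIdx?_cons,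
        decide_eq_true_eq]
      cases rest with
      | nil => simp [cmdFindLoop]
      | cons d rest' =>
        simp only [cmdFindLoop, List.length_cons]
        have h : 0 + 1 < rest'.length + 1 + 1 := by omega
        simp [h]
    · simp only [cmdFindLoop, Bool.false_eq_true, if_false, hp, List.findIdx?_cons,
        decide_eq_true_eq]
      rw [ih (i + 1)]
      cases hf : rest.findIdx? (fun c => PySem.Str.lower c ∈ ["/c", "/k"]) with
      | none => simp
      | some j =>
        simp only [Option.map_some, List.length_cons]
        by_cases h : j + 1 < rest.length
        · have h2 : j + 1 + 1 < rest.length + 1 := by omega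
          simp only [h, dif_pos, h2]
          refine Prod.ext ?_ ?_
          · show i + 1 + (j : Int) + 1 = i + ((j : Nat) + 1 : Nat) + 1
            push_cast; ring
          · simp
        · have h2 : ¬ (j + 1 + 1 < rest.length + 1) := by omega
          simp [h, h2]

theorem foldl_min_map_succ (hs : List Nat) (init : Nat) :
    (hs.map (· + 1)).foldl min (init + 1) = hs.foldl min init + 1 := by
  induction hs generalizing init with
  | nil => simp
  | cons x t ih => simp [List.foldl, Nat.succ_min_succ, ih]

theorem foldl_min_zero (l : List Nat) : l.foldl min 0 = 0 := by
  induction l with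
  | nil => rfl
  | cons x t ih => simpa [List.foldl, Nat.zero_min] using ih

theorem min?_id_map_succ (hs : List Nat) :
    PySem.List.min? (hs.map (· + 1)) (fun x => x)
      = (PySem.List.min? hs (fun x => x)).map (· + 1) := by
  cases hs with
  | nil => simp [PySem.List.min?]
  | cons x t => simp [PySem.List.min?_id_cons, foldl_min_map_succ]

-- the staged min-of-two-index search equals findIdx? of the disjunction
theorem minHits (a b : String) (L : List String) :
    PySem.List.min? (([a, b].filter (fun m => decide (m ∈ L))).filterMap
        (fun m => PySem.List.index? L m)) (fun x => x)
      = L.findIdx? (fun c => decide (c = a ∨ c = b)) := by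
  induction L with
  | nil => simp [PySem.List.min?]
  | cons c t ih =>
    by_cases hca : c = a
    · subst hca
      simp [List.idxOf?_cons, List.findIdx?_cons, PySem.List.min?_id_cons,
        foldl_min_zero]
    · by_cases hcb : c = b
      · subst hcb
        have ha' : ¬ a = c := fun h => hca h.symm
        by_cases h1 : a ∈ t
        · have hk' := (PySem.List.index?_isSome_iff (xs := t) (v := a)).2 h1
          rw [PySem.List.index?_eq_idxOf?] at hk'
          obtain ⟨k, hk⟩ := Option.isSome_iff_exists.1 hk'
          simp [h1, hk, hca, ha', List.idxOf?_cons, List.findIdx?_cons,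
            PySem.List.min?_id_cons]
        · simp [h1, hca, ha', List.idxOf?_cons, List.findIdx?_cons,
            PySem.List.min?_id_cons]
      · have ha' : ¬ a = c := fun h => hca h.symm
        have hb' : ¬ b = c := fun h => hcb h.symm
        have hpc : (decide (c = a ∨ c = b)) = false := by simp [hca, hcb]
        rw [List.findIdx?_cons]
        simp only [hpc, Bool.false_eq_true, if_false]
        rw [← ih]
        have hmap : ([a, b].filter (fun m => decide (m ∈ c :: t))).filterMap
              (fun m => PySem.List.index? (c :: t) m)
            = (([a, b].filter (fun m => decide (m ∈ t))).filterMap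
              (fun m => PySem.List.index? t m)).map (· + 1) := by
          simp only [List.map_filterMap]
          by_cases h1 : a ∈ t <;> by_cases h2 : b ∈ t <;>
            simp [h1, h2, ha', hb', hca, hcb, List.mem_cons, List.idxOf?_cons,
              List.filterMap]
        rw [hmap, min?_id_map_succ]

-- ===== VERDICT (by name: the statement is the Claim_ definition above) =====
theorem cmd_find_command_spec : Claim_equal_cmd_find_command := by
  intro l _
  unfold Spec_cmd_find_command cmd_find_command cmd_find_command_alt
  rw [cmdFindLoop_false]
  simp only []
  rw [minHits]
  have hfun : ((fun c => decide (c = "/c" ∨ c = "/k")) ∘ PySem.Str.lower)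
      = (fun c => decide (PySem.Str.lower c ∈ (["/c", "/k"] : List String))) := by
    funext x; simp [List.mem_cons]
  rw [List.findIdx?_map, hfun]
  cases hf : l.findIdx? (fun c => decide (PySem.Str.lower c ∈ (["/c", "/k"] : List String))) with
  | none => simp
  | some j =>
    by_cases h : j + 1 < l.length <;> simp [h]
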